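-- pv_equiv track=rewrite | github.com/dbizzaro/WFOMC-beyond-FOL | wfomc.py | number_of_extensions
-- ===== SOURCE A (Python) =====
-- import math
--
-- def number_of_extensions(n_ij_matrix_for_extensions, k_prime, k_second, actual_u, C):
--   prod_ = 1
--   if k_prime in C:
--     for j, k_j in enumerate(k_second):
--       prod_ *= C[k_prime][j] ** k_j
--   else:
--     C[k_prime] = [math.prod([n_ij_matrix_for_extensions[i][j]**k_i for i, k_i in enumerate(k_prime)]) for j in range(actual_u)]
--     return number_of_extensions(n_ij_matrix_for_extensions, k_prime, k_second, actual_u, C)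
--   return prod_
-- ===== SOURCE B (Python) =====
-- import math
--
-- def number_of_extensions(n_ij_matrix_for_extensions, k_prime, k_second, actual_u, C):
--     if k_prime not in C:
--         # populate the cache for later callers (same side effect as A)
--         C[k_prime] = [math.prod(row[j] ** k_i
--                                 for row, k_i in zip(n_ij_matrix_for_extensions, k_prime))
--                       for j in range(actual_u)]
--         # answer directly by exponent algebra, without reading the cached row:
--         # prod_j (prod_i a_ij^k'_i)^k''_j  ==  prod_{i,j} a_ij^(k'_i * k''_j)
--         return math.prod(row[j] ** (k_i * k_j)
--                          for row, k_i in zip(n_ij_matrix_for_extensions, k_prime)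
--                          for j, k_j in enumerate(k_second))
--     return math.prod(c ** k for c, k in zip(C[k_prime], k_second))
-- ===== Notes on version B (the rewrite author's own statement) =====
-- stated objective: alternative
-- what changed: On a cache miss B does not recurse and does not read the cached row back at all: it returns the flattened double product prod_{i,j} n[i][j]**(k_prime[i]*k_second[j]) by the exponent identity (prod_i a_i^p)^q = prod_i a_i^(p*q), iterating rows of n zipped with k_prime instead of indexing a built row; the cache-hit path multiplies over zip(C[k_prime], k_second) instead of enumerate-indexing; the cache mutation of C is preserved.
-- outside the precondition, e.g. on number_of_extensions([[2]], (1,), [-1], 1, {}): A returns 0.5, B returns 0.5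
import Mathlib
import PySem

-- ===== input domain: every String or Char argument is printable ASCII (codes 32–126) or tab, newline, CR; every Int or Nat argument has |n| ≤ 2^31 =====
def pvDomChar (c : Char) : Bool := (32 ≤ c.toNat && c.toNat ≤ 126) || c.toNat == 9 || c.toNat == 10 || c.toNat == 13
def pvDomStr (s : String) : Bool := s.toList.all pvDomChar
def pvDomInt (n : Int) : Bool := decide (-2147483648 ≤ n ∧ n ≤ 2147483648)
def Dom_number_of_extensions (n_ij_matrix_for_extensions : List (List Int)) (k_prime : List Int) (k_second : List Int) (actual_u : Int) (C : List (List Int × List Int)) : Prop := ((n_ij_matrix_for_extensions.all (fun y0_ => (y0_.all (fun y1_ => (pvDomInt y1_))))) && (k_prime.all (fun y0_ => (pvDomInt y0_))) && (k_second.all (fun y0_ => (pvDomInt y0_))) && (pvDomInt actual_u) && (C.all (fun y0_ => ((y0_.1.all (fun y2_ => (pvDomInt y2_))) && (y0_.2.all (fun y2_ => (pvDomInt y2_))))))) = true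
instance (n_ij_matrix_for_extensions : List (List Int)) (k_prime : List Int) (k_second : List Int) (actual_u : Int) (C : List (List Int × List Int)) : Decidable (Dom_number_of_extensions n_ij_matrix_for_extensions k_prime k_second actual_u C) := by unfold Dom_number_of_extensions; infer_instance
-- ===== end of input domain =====

-- B replaces A's cache-miss recursion by a direct flattened double product over zipped rows,
-- prod_{i,j} n[i][j]^(k'_i*k''_j), never reading the cached row back; equivalence is about the
-- RETURN value only (both Pythons perform the same mutation of C).
-- '**' is ported as '^ ·.toNat', exact for the nonnegative exponents admitted by Pre_.

-- ===== PORT A =====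
def number_of_extensions (n_ij_matrix_for_extensions : List (List Int)) (k_prime : List Int) (k_second : List Int) (actual_u : Int) (C : List (List Int × List Int)) : Int :=
  if (PySem.Dict.mk C).contains k_prime = true then
    -- prod_ = 1; for j, k_j in enumerate(k_second): prod_ *= C[k_prime][j] ** k_j
    (PySem.List.enumerate k_second).foldl
      (fun prod_ jk => prod_ * (PySem.List.pyGetD ((PySem.Dict.mk C).getD k_prime []) jk.1 0) ^ jk.2.toNat) 1
  else
    -- C[k_prime] = [math.prod([n[i][j]**k_i for i, k_i in enumerate(k_prime)]) for j in range(actual_u)]; recurse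
    number_of_extensions n_ij_matrix_for_extensions k_prime k_second actual_u
      (((PySem.Dict.mk C).insert k_prime
        ((PySem.List.pyRange 0 actual_u 1).map (fun j =>
          ((PySem.List.enumerate k_prime).map (fun ik =>
            (PySem.List.pyGetD (PySem.List.pyGetD n_ij_matrix_for_extensions ik.1 []) j 0) ^ ik.2.toNat)).foldl (· * ·) 1))).items)
termination_by (if (PySem.Dict.mk C).contains k_prime = true then 0 else 1)
decreasing_by simp_all [PySem.Dict.mem_items_insert]

-- ===== PORT B =====
def number_of_extensions_alt (n_ij_matrix_for_extensions : List (List Int)) (k_prime : List Int) (k_second : List Int) (actual_u : Int) (C : List (List Int × List Int)) : Int :=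
  match (PySem.Dict.mk C).get? k_prime with
  | none =>
      -- cache miss: flattened double product over zip(n, k_prime) × enumerate(k_second),
      -- exponent k_i * k_j (the cache row is written by the Python for later callers only)
      (List.zip n_ij_matrix_for_extensions k_prime).foldl
        (fun acc rk =>
          (PySem.List.enumerate k_second).foldl
            (fun acc2 jk => acc2 * (PySem.List.pyGetD rk.1 jk.1 0) ^ (rk.2 * jk.2).toNat) acc) 1
  | some row =>
      -- cache hit: math.prod(c ** k for c, k in zip(C[k_prime], k_second))
      (List.zip row k_second).foldl (fun acc ck => acc * ck.1 ^ ck.2.toNat) 1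

-- ===== PRECONDITION & SPEC =====
-- Pre_ excludes inputs where the Python A raises (an index of the cached/built row beyond its
-- length, or a row of n shorter than actual_u, or fewer rows than k_prime) and inputs where a
-- negative exponent makes A return a float, which is not a value of the declared int type.
def Pre_number_of_extensions (n_ij_matrix_for_extensions : List (List Int)) (k_prime : List Int) (k_second : List Int) (actual_u : Int) (C : List (List Int × List Int)) : Prop :=
  (∀ k ∈ k_second, 0 ≤ k) ∧
  (if ((PySem.Dict.mk C).get? k_prime).isSome = true then
      k_second.length ≤ (((PySem.Dict.mk C).get? k_prime).getD []).length
    else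
      (∀ k ∈ k_prime, 0 ≤ k) ∧ k_second.length ≤ actual_u.toNat ∧
      k_prime.length ≤ n_ij_matrix_for_extensions.length ∧
      ∀ r ∈ n_ij_matrix_for_extensions.take k_prime.length, actual_u.toNat ≤ r.length)
instance (n_ij_matrix_for_extensions : List (List Int)) (k_prime : List Int) (k_second : List Int) (actual_u : Int) (C : List (List Int × List Int)) : Decidable (Pre_number_of_extensions n_ij_matrix_for_extensions k_prime k_second actual_u C) := by unfold Pre_number_of_extensions; infer_instance

def pvWitness_number_of_extensions : List (List Int) × List Int × List Int × Int × (List (List Int × List Int)) :=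
  ([[2, 3], [1, 4]], [1, 2], [3, 1], 2, [([0, 1], [5, 7])])

def Spec_number_of_extensions (n_ij_matrix_for_extensions : List (List Int)) (k_prime : List Int) (k_second : List Int) (actual_u : Int) (C : List (List Int × List Int)) (out : Int) : Prop := out = number_of_extensions_alt n_ij_matrix_for_extensions k_prime k_second actual_u C
instance (n_ij_matrix_for_extensions : List (List Int)) (k_prime : List Int) (k_second : List Int) (actual_u : Int) (C : List (List Int × List Int)) (out : Int) : Decidable (Spec_number_of_extensions n_ij_matrix_for_extensions k_prime k_second actual_u C out) := by unfold Spec_number_of_extensions; infer_instance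

-- ===== CLAIM (what is proved, stated in full; the proofs are below) =====
def Claim_equal_number_of_extensions : Prop := ∀ (n_ij_matrix_for_extensions : List (List Int)) (k_prime : List Int) (k_second : List Int) (actual_u : Int) (C : List (List Int × List Int)), Dom_number_of_extensions n_ij_matrix_for_extensions k_prime k_second actual_u C → Pre_number_of_extensions n_ij_matrix_for_extensions k_prime k_second actual_u C → Spec_number_of_extensions n_ij_matrix_for_extensions k_prime k_second actual_u C (number_of_extensions n_ij_matrix_for_extensions k_prime k_second actual_u C)

-- ===== LEMMAS AND PROOFS =====

-- enumerate with a shifted start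
theorem pv_enumerate_shift {α : Type} (xs : List α) (s : Int) :
    PySem.List.enumerate xs (s + 1) = (PySem.List.enumerate xs s).map (fun p => (p.1 + 1, p.2)) := by
  induction xs generalizing s with
  | nil => simp [PySem.List.enumerate_nil]
  | cons x t ih => simp [PySem.List.enumerate_cons, ih]

-- an enumerate-indexed map over a long-enough row is a map over the zip
theorem pv_enum_map_get_zip {α β : Type} (g : α → Int → β) (d : α) :
    ∀ (ks : List Int) (row : List α), ks.length ≤ row.length →
      (PySem.List.enumerate ks).map (fun jk => g (PySem.List.pyGetD row jk.1 d) jk.2)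
        = (row.zip ks).map (fun p => g p.1 p.2) := by
  intro ks
  induction ks with
  | nil => intro row _; simp [PySem.List.enumerate_nil]
  | cons k kt ih =>
    intro row hlen
    cases row with
    | nil => simp at hlen
    | cons r rt =>
      simp only [PySem.List.enumerate_cons, List.map_cons, List.zip_cons_cons,
        PySem.List.pyGetD_zero_cons]
      congr 1
      rw [pv_enumerate_shift, List.map_map]
      rw [← ih rt (by simpa using hlen)]
      apply List.map_congr_left
      intro jk hjk
      rcases (PySem.List.mem_enumerate_iff _ _ _).1 hjk with ⟨m, hm, rfl⟩
      have hcast : ((0:Int) + (m:Int), kt[m]).1 + 1 = ((m + 1 : Nat) : Int) := by push_cast; ring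
      simp only [Function.comp, hcast, PySem.List.pyGetD_natCast, List.getD_cons_succ]
      simp

-- multiplying accumulator loop is a product
theorem pv_foldl_mul {α : Type} (f : α → Int) :
    ∀ (l : List α) (a : Int), l.foldl (fun p x => p * f x) a = a * (l.map f).prod := by
  intro l
  induction l with
  | nil => intro a; simp
  | cons x t ih => intro a; simp [ih, mul_assoc]

-- power of a product of a list
theorem pv_prod_pow {α : Type} (l : List α) (f : α → Int) (e : Nat) :
    (l.map f).prod ^ e = (l.map (fun x => f x ^ e)).prod := by
  induction l with
  | nil => simp
  | cons x t ih => simp [mul_pow, ih]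

-- swapping a double product
theorem pv_prod_comm {α β : Type} (l1 : List α) (l2 : List β) (f : α → β → Int) :
    (l1.map (fun a => (l2.map (f a)).prod)).prod
      = (l2.map (fun b => (l1.map (fun a => f a b)).prod)).prod := by
  induction l1 with
  | nil => simp
  | cons a t ih => simp [List.prod_map_mul, ih]

-- zipping range(s, b) with a short-enough list is enumerate from s
theorem pv_range_zip_enum : ∀ (ks : List Int) (s b : Int), ks.length ≤ (b - s).toNat →
    (PySem.List.pyRange s b 1).zip ks = PySem.List.enumerate ks s := by
  intro ks
  induction ks with
  | nil => intro s b _; simp [PySem.List.enumerate_nil]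
  | cons k kt ih =>
    intro s b hlen
    have hsb : s < b := by simp at hlen; omega
    rw [PySem.List.pyRange_one_cons hsb, List.zip_cons_cons, PySem.List.enumerate_cons,
        ih (s + 1) b (by simp at hlen ⊢; omega)]

-- combined exponents for nonnegative Int exponents
theorem pv_pow_toNat_mul (x : Int) (a b : Int) (ha : 0 ≤ a) (hb : 0 ≤ b) :
    (x ^ a.toNat) ^ b.toNat = x ^ (a * b).toNat := by
  obtain ⟨a', rfl⟩ := Int.eq_ofNat_of_zero_le ha
  obtain ⟨b', rfl⟩ := Int.eq_ofNat_of_zero_le hb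
  rw [← pow_mul, ← Int.natCast_mul, Int.toNat_natCast, Int.toNat_natCast, Int.toNat_natCast]

-- ===== VERDICT (by name: the statement is the Claim_ definition above) =====
theorem number_of_extensions_spec : Claim_equal_number_of_extensions := by
  intro n kp ks u C _ hpre
  unfold Spec_number_of_extensions
  obtain ⟨hks, hpre2⟩ := hpre
  rw [number_of_extensions, number_of_extensions_alt]
  rcases hget : (PySem.Dict.mk C).get? kp with _ | row
  · -- cache miss
    have hcont : (PySem.Dict.mk C).contains kp = false := by
      rw [PySem.Dict.contains_eq_isSome_get?, hget]; rfl
    rw [if_neg (by simp [hcont])]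
    rw [if_neg (by simp [hget]) ] at hpre2
    obtain ⟨hkp, hlen, hnp, hrows⟩ := hpre2
    rw [number_of_extensions]
    rw [if_pos (by simp [PySem.Dict.mem_items_insert])]
    rw [PySem.Dict.getD_insert_self]
    -- turn all folds into products of maps
    simp only [pv_foldl_mul, one_mul]
    -- A side: zip the enumerate-index away
    rw [pv_enum_map_get_zip (fun c k => c ^ k.toNat) 0 ks _
          (by simp [PySem.List.length_pyRange_one]; omega)]
    rw [List.zip_map_left, List.map_map]
    rw [pv_range_zip_enum ks 0 u (by simpa using hlen)]
    -- now both sides are products over (enumerate ks) / (n.zip kp); normalise A's term and swap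
    refine Eq.trans (congrArg List.prod (List.map_congr_left ?_))
      (pv_prod_comm (PySem.List.enumerate ks) (n.zip kp)
        (fun jk rk => (PySem.List.pyGetD rk.1 jk.1 0) ^ (rk.2 * jk.2).toNat))
    intro jk hjk
    have hjk2 : jk.2 ∈ ks := by
      rcases (PySem.List.mem_enumerate_iff _ _ _).1 hjk with ⟨m, hm, rfl⟩
      simp
    simp only [Function.comp, Prod.map, id_eq]
    rw [← List.prod_eq_foldl]
    rw [pv_enum_map_get_zip (fun r k => (PySem.List.pyGetD r jk.1 0) ^ k.toNat) ([] : List Int) kp n hnp]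
    rw [pv_prod_pow]
    apply congrArg
    apply List.map_congr_left
    intro rk hrk
    have hrk2 : rk.2 ∈ kp := (List.of_mem_zip hrk).2
    exact pv_pow_toNat_mul _ _ _ (hkp _ hrk2) (hks _ hjk2)
  · -- cache hit
    have hcont : (PySem.Dict.mk C).contains kp = true := by
      rw [PySem.Dict.contains_eq_isSome_get?, hget]; rfl
    rw [if_pos hcont]
    rw [if_pos (by simp [hget])] at hpre2
    rw [hget] at hpre2
    simp only [Option.getD_some] at hpre2
    rw [PySem.Dict.getD_eq_get?_getD, hget]
    simp only [Option.getD_some]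
    simp only [pv_foldl_mul, one_mul]
    rw [pv_enum_map_get_zip (fun c k => c ^ k.toNat) 0 ks row hpre2]
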